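-- pv_equiv track=rewrite | github.com/waypope3/envchain | envchain/scoper.py | extract_scopes
-- ===== SOURCE A (Python) =====
-- def extract_scopes(env: dict, separator: str = "__") -> dict:
--     """Group env keys by their scope prefix.
--
--     Returns a dict mapping scope -> {stripped_key: value}.
--     Keys without a separator are placed under the empty string scope.
--     """
--     result: dict = {}
--     for k, v in env.items():
--         if separator in k:
--             scope, _, rest = k.partition(separator)
--             result.setdefault(scope, {})[rest] = v
--         else:
--             result.setdefault("", {})[k] = v
--     return result
-- ===== SOURCE B (Python) =====
-- def extract_scopes(env: dict, separator: str = "__") -> dict: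
--     """Group env keys by scope prefix: two passes instead of setdefault —
--     first collect the distinct scopes in order of first appearance, then
--     build each scope's inner dict with one comprehension over the items."""
--
--     def scope_of(k):
--         return k.partition(separator)[0] if separator in k else ""
--
--     def rest_of(k):
--         return k.partition(separator)[2] if separator in k else k
--
--     scopes = []
--     for k in env:
--         s = scope_of(k)
--         if s not in scopes:
--             scopes.append(s)
--     return {s: {rest_of(k): v for k, v in env.items() if scope_of(k) == s}
--             for s in scopes}
-- ===== Notes on version B (the rewrite author's own statement) =====
-- stated objective: alternative
-- what changed: Replaces A's single pass with incremental setdefault mutation by a two-phase decomposition: collect distinct scopes in first-appearance order, then build each scope's inner dict with a comprehension filtering the items.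
import Mathlib
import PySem

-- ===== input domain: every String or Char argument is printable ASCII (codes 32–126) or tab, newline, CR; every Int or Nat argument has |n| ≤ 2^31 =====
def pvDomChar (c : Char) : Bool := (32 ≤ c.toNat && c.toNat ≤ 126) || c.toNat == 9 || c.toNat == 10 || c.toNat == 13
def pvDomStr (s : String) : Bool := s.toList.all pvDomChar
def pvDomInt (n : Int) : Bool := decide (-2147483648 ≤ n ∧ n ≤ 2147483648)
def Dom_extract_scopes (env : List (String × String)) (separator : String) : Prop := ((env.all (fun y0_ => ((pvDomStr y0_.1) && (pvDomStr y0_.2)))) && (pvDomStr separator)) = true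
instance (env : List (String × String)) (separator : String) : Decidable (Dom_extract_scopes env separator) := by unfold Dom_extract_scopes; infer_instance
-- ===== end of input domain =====

-- B groups env keys by scope in two phases (distinct scopes first, then one filtered pass per scope)
-- instead of A's single pass with setdefault; objective: alternative decomposition, same results.


-- ===== PORT A =====
-- `k.partition(separator)` is ported by hand: split at the FIRST occurrence of the separator,
-- located by PySem.Str.find; exact for separator ≠ "" (Python raises ValueError on an empty separator).
def extract_scopes (env : List (String × String)) (separator : String) : List (String × List (String × String)) :=
  (env.foldl
    (fun (result : PySem.Dict String (PySem.Dict String String)) kv =>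
      if PySem.Str.isIn separator kv.1 then
        let i := (PySem.Str.find kv.1 separator).toNat
        let scope := String.ofList (kv.1.toList.take i)
        let rest := String.ofList (kv.1.toList.drop (i + separator.toList.length))
        result.insert scope ((result.getD scope PySem.Dict.empty).insert rest kv.2)
      else
        result.insert "" ((result.getD "" PySem.Dict.empty).insert kv.1 kv.2))
    PySem.Dict.empty).items.map (fun p => (p.1, p.2.items))

-- ===== PORT B =====
-- Source B's scope_of / rest_of (same hand port of partition, exact for separator ≠ "")
def pvScopeOf (separator k : String) : String :=
  if PySem.Str.isIn separator k then
    String.ofList (k.toList.take (PySem.Str.find k separator).toNat)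
  else ""

def pvRestOf (separator k : String) : String :=
  if PySem.Str.isIn separator k then
    String.ofList (k.toList.drop ((PySem.Str.find k separator).toNat + separator.toList.length))
  else k

def extract_scopes_alt (env : List (String × String)) (separator : String) : List (String × List (String × String)) :=
  let scopes := env.foldl (fun acc kv => PySem.Set.add acc (pvScopeOf separator kv.1)) []
  scopes.map (fun s =>
    (s, (env.foldl
          (fun (d : PySem.Dict String String) kv =>
            if pvScopeOf separator kv.1 = s then d.insert (pvRestOf separator kv.1) kv.2 else d)
          PySem.Dict.empty).items))

-- ===== PRECONDITION & SPEC =====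
-- Pre_ excludes exactly the inputs where Python A raises: str.partition("") is a ValueError,
-- reached whenever the separator is empty and env has at least one item.
def Pre_extract_scopes (env : List (String × String)) (separator : String) : Prop :=
  env = [] ∨ separator ≠ ""
instance (env : List (String × String)) (separator : String) : Decidable (Pre_extract_scopes env separator) := by unfold Pre_extract_scopes; infer_instance

def pvWitness_extract_scopes : (List (String × String)) × String := ([("app__host", "x"), ("debug", "1")], "__")

def Spec_extract_scopes (env : List (String × String)) (separator : String) (out : List (String × List (String × String))) : Prop := out = extract_scopes_alt env separator
instance (env : List (String × String)) (separator : String) (out : List (String × List (String × String))) : Decidable (Spec_extract_scopes env separator out) := by unfold Spec_extract_scopes; infer_instance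

-- ===== CLAIM (what is proved, stated in full; the proofs are below) =====
def Claim_equal_extract_scopes : Prop := ∀ (env : List (String × String)) (separator : String), Dom_extract_scopes env separator → Pre_extract_scopes env separator → Spec_extract_scopes env separator (extract_scopes env separator)

-- ===== LEMMAS AND PROOFS =====

-- A's loop body, written with B's scope_of/rest_of (equal to it branch by branch)
def pvStep (separator : String) (d : PySem.Dict String (PySem.Dict String String)) (kv : String × String) : PySem.Dict String (PySem.Dict String String) :=
  d.insert (pvScopeOf separator kv.1)
    ((d.getD (pvScopeOf separator kv.1) PySem.Dict.empty).insert (pvRestOf separator kv.1) kv.2)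

def pvScopes (separator : String) (l : List (String × String)) : List String :=
  l.foldl (fun acc kv => PySem.Set.add acc (pvScopeOf separator kv.1)) []

def pvInner (separator : String) (s : String) (l : List (String × String)) : PySem.Dict String String :=
  l.foldl
    (fun d kv => if pvScopeOf separator kv.1 = s then d.insert (pvRestOf separator kv.1) kv.2 else d)
    PySem.Dict.empty

lemma pvStep_eq (separator : String) (d : PySem.Dict String (PySem.Dict String String)) (kv : String × String) :
    (if PySem.Str.isIn separator kv.1 then
        let i := (PySem.Str.find kv.1 separator).toNat
        let scope := String.ofList (kv.1.toList.take i)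
        let rest := String.ofList (kv.1.toList.drop (i + separator.toList.length))
        d.insert scope ((d.getD scope PySem.Dict.empty).insert rest kv.2)
      else
        d.insert "" ((d.getD "" PySem.Dict.empty).insert kv.1 kv.2))
      = pvStep separator d kv := by
  by_cases h : PySem.Chars.isIn separator.toList kv.1.toList = true <;>
    simp [pvStep, pvScopeOf, pvRestOf, h]

lemma pv_get?_mk_map (L : List String) (g : String → PySem.Dict String String) (s : String) :
    (PySem.Dict.mk (L.map (fun t => (t, g t)))).get? s = if s ∈ L then some (g s) else none := by
  induction L with
  | nil => simp [PySem.Dict.get?]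
  | cons a L ih =>
      by_cases h : a = s
      · subst h; simp [PySem.Dict.get?_mk_cons]
      · simp [PySem.Dict.get?_mk_cons, h, ih, Ne.symm h]

lemma pvInner_empty (separator s : String) (l : List (String × String))
    (h : ∀ kv ∈ l, pvScopeOf separator kv.1 ≠ s) : pvInner separator s l = PySem.Dict.empty := by
  induction l with
  | nil => rfl
  | cons kv l ih =>
      have h1 := h kv (by simp)
      simp only [pvInner, List.foldl_cons, if_neg h1]
      exact ih (fun kv hm => h kv (by simp [hm]))

lemma pvScopes_mem (separator : String) (l : List (String × String)) (kv : String × String)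
    (h : kv ∈ l) : pvScopeOf separator kv.1 ∈ pvScopes separator l := by
  have : pvScopes separator l = PySem.Set.ofList (l.map (fun kv => pvScopeOf separator kv.1)) := by
    simp [pvScopes, PySem.Set.ofList_eq_foldl, List.foldl_map]
  rw [this, PySem.Set.mem_ofList]
  exact List.mem_map_of_mem h

lemma pvBuild_eq (separator : String) (l : List (String × String)) :
    l.foldl (pvStep separator) PySem.Dict.empty
      = PySem.Dict.mk ((pvScopes separator l).map (fun s => (s, pvInner separator s l))) := by
  induction l using List.reverseRecOn with
  | nil => rfl
  | append_singleton l kv ih =>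
      rw [List.foldl_append, List.foldl_cons, List.foldl_nil, ih]
      have hscopes : pvScopes separator (l ++ [kv])
          = PySem.Set.add (pvScopes separator l) (pvScopeOf separator kv.1) := by
        simp [pvScopes, List.foldl_append]
      have hinner : ∀ s, pvInner separator s (l ++ [kv])
          = if pvScopeOf separator kv.1 = s then
              (pvInner separator s l).insert (pvRestOf separator kv.1) kv.2
            else pvInner separator s l := by
        intro s
        simp only [pvInner, List.foldl_append, List.foldl_cons, List.foldl_nil]
      show ((PySem.Dict.mk ((pvScopes separator l).map (fun t => (t, pvInner separator t l)))).insert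
              (pvScopeOf separator kv.1)
              (((PySem.Dict.mk ((pvScopes separator l).map (fun t => (t, pvInner separator t l)))).getD
                  (pvScopeOf separator kv.1) PySem.Dict.empty).insert (pvRestOf separator kv.1) kv.2))
          = PySem.Dict.mk ((pvScopes separator (l ++ [kv])).map
              (fun s => (s, pvInner separator s (l ++ [kv]))))
      apply PySem.Dict.ext
      rw [hscopes]
      by_cases hS : pvScopeOf separator kv.1 ∈ pvScopes separator l
      · have hget : (PySem.Dict.mk ((pvScopes separator l).map (fun t => (t, pvInner separator t l)))).get?
            (pvScopeOf separator kv.1) = some (pvInner separator (pvScopeOf separator kv.1) l) := by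
          rw [pv_get?_mk_map]; simp [hS]
        have hcont : (PySem.Dict.mk ((pvScopes separator l).map (fun t => (t, pvInner separator t l)))).contains
            (pvScopeOf separator kv.1) = true := by
          rw [PySem.Dict.contains_eq_isSome_get?, hget]; rfl
        rw [PySem.Dict.getD_eq_get?_getD, hget, PySem.Dict.items_insert_of_contains _ _ hcont]
        have hadd : PySem.Set.add (pvScopes separator l) (pvScopeOf separator kv.1)
            = pvScopes separator l := by simp [PySem.Set.add, hS]
        rw [hadd]
        simp only [List.map_map]
        apply List.map_congr_left
        intro t _
        by_cases ht : t = pvScopeOf separator kv.1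
        · subst ht; simp [hinner, Option.getD]
        · simp [Function.comp, ht, Ne.symm ht, hinner]
      · have hget : (PySem.Dict.mk ((pvScopes separator l).map (fun t => (t, pvInner separator t l)))).get?
            (pvScopeOf separator kv.1) = none := by
          rw [pv_get?_mk_map]; simp [hS]
        have hcont : (PySem.Dict.mk ((pvScopes separator l).map (fun t => (t, pvInner separator t l)))).contains
            (pvScopeOf separator kv.1) = false := by
          rw [PySem.Dict.contains_eq_isSome_get?, hget]; rfl
        have hgS : pvInner separator (pvScopeOf separator kv.1) l = PySem.Dict.empty := by
          apply pvInner_empty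
          intro kv' hm hc
          exact hS (hc ▸ pvScopes_mem separator l kv' hm)
        rw [PySem.Dict.getD_eq_get?_getD, hget, PySem.Dict.items_insert_of_not_contains _ _ hcont]
        have hadd : PySem.Set.add (pvScopes separator l) (pvScopeOf separator kv.1)
            = pvScopes separator l ++ [pvScopeOf separator kv.1] := by simp [PySem.Set.add, hS]
        rw [hadd]
        simp only [List.map_append, List.map_cons, List.map_nil]
        congr 1
        · apply List.map_congr_left
          intro t htL
          have ht : pvScopeOf separator kv.1 ≠ t := fun h => hS (h ▸ htL)
          simp [hinner, ht]
        · simp [hinner, hgS, Option.getD]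

-- ===== VERDICT (by name: the statement is the Claim_ definition above) =====
theorem extract_scopes_spec : Claim_equal_extract_scopes := by
  intro env separator _ _
  unfold Spec_extract_scopes extract_scopes extract_scopes_alt
  have hstep : env.foldl
      (fun (result : PySem.Dict String (PySem.Dict String String)) kv =>
        if PySem.Str.isIn separator kv.1 then
          let i := (PySem.Str.find kv.1 separator).toNat
          let scope := String.ofList (kv.1.toList.take i)
          let rest := String.ofList (kv.1.toList.drop (i + separator.toList.length))
          result.insert scope ((result.getD scope PySem.Dict.empty).insert rest kv.2)
        else
          result.insert "" ((result.getD "" PySem.Dict.empty).insert kv.1 kv.2))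
      PySem.Dict.empty = env.foldl (pvStep separator) PySem.Dict.empty := by
    apply PySem.List.foldl_congr_mem
    intro d kv _
    exact pvStep_eq separator d kv
  rw [hstep, pvBuild_eq]
  simp [pvScopes, pvInner, List.map_map, Function.comp]
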